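-- pv_equiv track=rewrite | github.com/martha-ketsela-mengistu/conversion-engine | agent/enrichment/competitor_gap.py | _determine_primary_sector
-- ===== SOURCE A (Python) =====
-- from typing import Dict, Any, List, Optional
--
-- def _determine_primary_sector(industries: List[str]) -> Optional[str]:
--     if not industries:
--         return None
--     priority = ["software", "saas", "fintech", "healthcare", "e-commerce", "ai"]
--     industries_lower = [i.lower() for i in industries]
--     for sector in priority:
--         if any(sector in i for i in industries_lower):
--             return sector
--     return industries[0].lower()
-- ===== SOURCE B (Python) =====
-- def _determine_primary_sector(industries):
--     if not industries:
--         return None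
--     priority = ["software", "saas", "fintech", "healthcare", "e-commerce", "ai"]
--     best = None
--     for ind in industries:
--         low = ind.lower()
--         for idx, sector in enumerate(priority):
--             if sector in low and (best is None or idx < best):
--                 best = idx
--     return priority[best] if best is not None else industries[0].lower()
-- ===== Notes on version B (the rewrite author's own statement) =====
-- stated objective: alternative
-- what changed: Inverted the loop nesting: B iterates over the industries outer and the priority list inner, maintaining a minimum-priority-index accumulator across the whole double pass, instead of A's priority-first scan with an early return on the first sector any lowercased industry contains.
import Mathlib
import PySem

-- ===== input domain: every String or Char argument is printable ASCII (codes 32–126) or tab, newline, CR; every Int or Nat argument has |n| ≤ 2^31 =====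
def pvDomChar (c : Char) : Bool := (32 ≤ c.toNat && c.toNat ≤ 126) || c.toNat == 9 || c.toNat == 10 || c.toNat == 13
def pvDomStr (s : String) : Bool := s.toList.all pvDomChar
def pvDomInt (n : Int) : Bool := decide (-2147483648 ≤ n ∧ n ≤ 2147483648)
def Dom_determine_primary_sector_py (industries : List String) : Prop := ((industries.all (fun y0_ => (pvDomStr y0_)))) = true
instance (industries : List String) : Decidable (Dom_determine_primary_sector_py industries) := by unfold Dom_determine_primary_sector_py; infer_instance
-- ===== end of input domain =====

-- B restructures A: industries outer / priority inner, with a minimum-priority-index accumulator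
-- instead of A's priority-first early-return scan ("alternative"; same asymptotic cost).

-- ===== PORT A =====
-- A's loop "for sector in priority: if any(sector in i for i in industries_lower): return sector"
def aScan (lows : List String) : List String → Option String
  | [] => none
  | s :: r => if lows.any (fun i => PySem.Str.isIn s i) then some s else aScan lows r

def determine_primary_sector_py (industries : List String) : Option String :=
  match industries with
  | [] => none
  | x :: rest =>
    let priority := ["software", "saas", "fintech", "healthcare", "e-commerce", "ai"]
    let lows := (x :: rest).map PySem.Str.lower
    match aScan lows priority with
    | some s => some s
    | none => some (PySem.Str.lower x)

-- ===== PORT B =====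
-- B's inner-loop body: "if sector in low and (best is None or idx < best): best = idx"
def bStep (low : String) (best : Option Int) (p : Int × String) : Option Int :=
  if PySem.Str.isIn p.2 low then
    match best with
    | none => some p.1
    | some b => if p.1 < b then some p.1 else some b
  else best

def determine_primary_sector_py_alt (industries : List String) : Option String :=
  match industries with
  | [] => none
  | x :: rest =>
    let priority := ["software", "saas", "fintech", "healthcare", "e-commerce", "ai"]
    let best := (x :: rest).foldl
      (fun b ind => (PySem.List.enumerate priority).foldl (bStep (PySem.Str.lower ind)) b) none
    match best with
    | some b => some ((PySem.List.pyGet? priority b).getD "")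
    | none => some (PySem.Str.lower x)

-- ===== PRECONDITION & SPEC =====
def Spec_determine_primary_sector_py (industries : List String) (out : Option String) : Prop := out = determine_primary_sector_py_alt industries
instance (industries : List String) (out : Option String) : Decidable (Spec_determine_primary_sector_py industries out) := by unfold Spec_determine_primary_sector_py; infer_instance

-- ===== CLAIM (what is proved, stated in full; the proofs are below) =====
def Claim_equal_determine_primary_sector_py : Prop := ∀ (industries : List String), Dom_determine_primary_sector_py industries → Spec_determine_primary_sector_py industries (determine_primary_sector_py industries)

-- ===== LEMMAS AND PROOFS =====

-- option-min on Option Int (none = "no index yet")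
def omin : Option Int → Option Int → Option Int
  | none, b => b
  | a, none => a
  | some x, some y => some (min x y)

theorem omin_none_right (a : Option Int) : omin a none = a := by cases a <;> rfl

theorem omin_assoc (a b c : Option Int) : omin (omin a b) c = omin a (omin b c) := by
  cases a <;> cases b <;> cases c <;> simp [omin, min_assoc]

-- first index ≥ k (counting from k) whose element satisfies p
def firstSat (p : String → Bool) (k : Int) : List String → Option Int
  | [] => none
  | s :: r => if p s then some k else firstSat p (k + 1) r

theorem firstSat_lb (p : String → Bool) (xs : List String) : ∀ (k j : Int), firstSat p k xs = some j → k ≤ j := by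
  induction xs with
  | nil => intro k j h; simp [firstSat] at h
  | cons s r ih =>
    intro k j h
    cases hp : p s with
    | true => simp [firstSat, hp] at h; omega
    | false =>
      simp only [firstSat, hp, Bool.false_eq_true, if_false] at h
      have := ih (k + 1) j h; omega

theorem firstSat_congr (p q : String → Bool) (xs : List String) (h : ∀ s ∈ xs, p s = q s) :
    ∀ k, firstSat p k xs = firstSat q k xs := by
  induction xs with
  | nil => intro k; rfl
  | cons s r ih =>
    intro k
    rw [firstSat, firstSat, h s (by simp)]
    split_ifs with hq
    · rfl
    · exact ih (fun t ht => h t (by simp [ht])) (k + 1)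

theorem firstSat_false (p : String → Bool) (xs : List String) (h : ∀ s ∈ xs, p s = false) :
    ∀ k, firstSat p k xs = none := by
  induction xs with
  | nil => intro k; rfl
  | cons s r ih =>
    intro k
    rw [firstSat, if_neg (by simp [h s (by simp)])]
    exact ih (fun t ht => h t (by simp [ht])) (k + 1)

theorem omin_some_firstSat (p : String → Bool) (r : List String) (k : Int) :
    omin (some k) (firstSat p (k + 1) r) = some k := by
  cases hf : firstSat p (k + 1) r with
  | none => rfl
  | some j =>
    have := firstSat_lb p r (k + 1) j hf
    simp only [omin, Option.some.injEq]
    omega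

theorem firstSat_some_omin (p : String → Bool) (r : List String) (k : Int) :
    omin (firstSat p (k + 1) r) (some k) = some k := by
  cases hf : firstSat p (k + 1) r with
  | none => rfl
  | some j =>
    have := firstSat_lb p r (k + 1) j hf
    simp only [omin, Option.some.injEq]
    omega

theorem omin_firstSat (p q : String → Bool) (xs : List String) :
    ∀ k, omin (firstSat p k xs) (firstSat q k xs) = firstSat (fun s => p s || q s) k xs := by
  induction xs with
  | nil => intro k; rfl
  | cons s r ih =>
    intro k
    cases hp : p s <;> cases hq : q s
    · simp only [firstSat, hp, hq, Bool.false_eq_true, if_false, Bool.false_or]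
      exact ih (k + 1)
    · simp only [firstSat, hp, hq, Bool.false_eq_true, Bool.false_or, if_false, if_true]
      exact firstSat_some_omin p r k
    · simp only [firstSat, hp, hq, Bool.false_eq_true, Bool.true_or, if_false, if_true]
      exact omin_some_firstSat q r k
    · simp [firstSat, hp, hq, omin]

theorem bStep_hit (low : String) (best : Option Int) (k : Int) (s : String)
    (hs : PySem.Str.isIn s low = true) : bStep low best (k, s) = omin best (some k) := by
  cases best with
  | none => unfold bStep; rw [if_pos hs]; rfl
  | some b =>
    unfold bStep; rw [if_pos hs]
    show (if k < b then some k else some b) = omin (some b) (some k)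
    simp only [omin]
    rcases lt_or_ge k b with h | h
    · rw [if_pos h, min_eq_right h.le]
    · rw [if_neg (not_lt.mpr h), min_eq_left h]

theorem bStep_skip (low : String) (best : Option Int) (k : Int) (s : String)
    (hs : ¬ PySem.Str.isIn s low = true) : bStep low best (k, s) = best := by
  unfold bStep; rw [if_neg hs]

-- B's inner loop over the enumerated priority list computes an option-min with the first match
theorem inner_fold (low : String) (xs : List String) :
    ∀ (k : Int) (best : Option Int),
      (PySem.List.enumerate xs k).foldl (bStep low) best
        = omin best (firstSat (fun s => PySem.Str.isIn s low) k xs) := by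
  induction xs with
  | nil => intro k best; rw [PySem.List.enumerate_nil]; simp only [List.foldl_nil, firstSat, omin_none_right]
  | cons s r ih =>
    intro k best
    rw [PySem.List.enumerate_cons]
    simp only [List.foldl_cons]
    by_cases hs : PySem.Str.isIn s low = true
    · rw [bStep_hit low best k s hs, ih (k + 1), firstSat, if_pos hs,
        omin_assoc, omin_some_firstSat]
    · rw [bStep_skip low best k s hs, ih (k + 1), firstSat, if_neg hs]

-- B's outer loop over the industries accumulates the option-min of all first matches
theorem outer_fold (xs : List String) (lows : List String) :
    ∀ (k : Int) (best : Option Int),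
      lows.foldl (fun b ind => (PySem.List.enumerate xs k).foldl (bStep (PySem.Str.lower ind)) b) best
        = omin best (firstSat (fun s => lows.any (fun l => PySem.Str.isIn s (PySem.Str.lower l))) k xs) := by
  induction lows with
  | nil =>
    intro k best
    rw [List.foldl_nil, firstSat_false _ _ (fun t _ => by simp) k]
    exact (omin_none_right best).symm
  | cons low rest ih =>
    intro k best
    rw [List.foldl_cons, inner_fold, ih k, omin_assoc, omin_firstSat]
    exact congrArg (omin best) (firstSat_congr _ _ xs (fun t _ => by simp) k)

-- proof-side view of A's scan with the "any industry matches" test abstracted to a predicate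
def aScanP (P : String → Bool) : List String → Option String
  | [] => none
  | s :: r => if P s then some s else aScanP P r

theorem aScan_eq_aScanP (lows : List String) (P : String → Bool)
    (hP : ∀ s, P s = lows.any (fun i => PySem.Str.isIn s i)) :
    ∀ xs, aScan lows xs = aScanP P xs := by
  intro xs
  induction xs with
  | nil => rfl
  | cons s r ih => rw [aScan, aScanP, hP, ih]

-- dispatch on the six fixed priority sectors: early-return scan vs indexed lookup of the min index
theorem final_step (P : String → Bool) (d : String) :
    (match aScanP P ["software", "saas", "fintech", "healthcare", "e-commerce", "ai"] with
     | some s => some s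
     | none => some d)
    = (match firstSat P 0 ["software", "saas", "fintech", "healthcare", "e-commerce", "ai"] with
       | some b => some ((PySem.List.pyGet? ["software", "saas", "fintech", "healthcare", "e-commerce", "ai"] b).getD "")
       | none => some d) := by
  cases h0 : P "software" <;> cases h1 : P "saas" <;> cases h2 : P "fintech" <;>
    cases h3 : P "healthcare" <;> cases h4 : P "e-commerce" <;> cases h5 : P "ai" <;>
    simp [aScanP, firstSat, h0, h1, h2, h3, h4, h5, PySem.List.pyGet?, PySem.List.pyIdx?]

-- ===== VERDICT (by name: the statement is the Claim_ definition above) =====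
theorem determine_primary_sector_py_spec : Claim_equal_determine_primary_sector_py := by
  intro industries _
  unfold Spec_determine_primary_sector_py
  cases industries with
  | nil => rfl
  | cons x rest =>
    show determine_primary_sector_py (x :: rest) = determine_primary_sector_py_alt (x :: rest)
    unfold determine_primary_sector_py determine_primary_sector_py_alt
    simp only
    rw [outer_fold]
    simp only [omin]
    rw [aScan_eq_aScanP ((x :: rest).map PySem.Str.lower)
        (fun s => (x :: rest).any (fun l => PySem.Str.isIn s (PySem.Str.lower l)))
        (fun s => by simp [List.any_map, Function.comp_def])]
    exact final_step _ _
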